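-- pv_equiv track=rewrite | github.com/haolunc/ARC-RL | reference_solutions/solutions/d2abd087.py | transform
-- ===== SOURCE A (Python) =====
-- def transform(grid):
--
--     h = len(grid)
--     w = len(grid[0]) if h else 0
--
--     out = [row[:] for row in grid]
--
--     visited = [[False] * w for _ in range(h)]
--
--     dirs = [(-1, 0), (1, 0), (0, -1), (0, 1)]
--
--     for r in range(h):
--         for c in range(w):
--             if grid[r][c] == 5 and not visited[r][c]:
--
--                 stack = [(r, c)]
--                 visited[r][c] = True
--                 component = []
--
--                 while stack:
--                     x, y = stack.pop()
--                     component.append((x, y))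
--
--                     for dx, dy in dirs:
--                         nx, ny = x + dx, y + dy
--                         if 0 <= nx < h and 0 <= ny < w:
--                             if not visited[nx][ny] and grid[nx][ny] == 5:
--                                 visited[nx][ny] = True
--                                 stack.append((nx, ny))
--
--                 new_colour = 2 if len(component) == 6 else 1
--                 for x, y in component:
--                     out[x][y] = new_colour
--
--     return out
-- ===== SOURCE B (Python) =====
-- def transform(grid):
--     h = len(grid)
--     w = len(grid[0]) if h else 0
--
--     def five(r, c):
--         return 0 <= r < h and 0 <= c < w and grid[r][c] == 5
--
--     def component_size(r, c):
--         cells = {(r, c)}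
--         while True:
--             grown = cells | {
--                 (nr, nc)
--                 for (x, y) in cells
--                 for (nr, nc) in ((x - 1, y), (x + 1, y), (x, y - 1), (x, y + 1))
--                 if five(nr, nc)
--             }
--             if len(grown) == len(cells):
--                 return len(cells)
--             cells = grown
--
--     return [
--         [
--             (2 if component_size(r, c) == 6 else 1) if five(r, c) else v
--             for c, v in enumerate(row)
--         ]
--         for r, row in enumerate(grid)
--     ]
-- ===== Notes on version B (the rewrite author's own statement) =====
-- stated objective: alternative
-- what changed: Replaces A's stateful row-major sweep with a global visited matrix and an explicit DFS stack by a per-cell fixed-point saturation: each 5-cell's component is grown from that cell alone by repeatedly adding 4-neighbours equal to 5 until the set stops growing, and the output is a pure nested comprehension over the grid.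
import Mathlib
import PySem

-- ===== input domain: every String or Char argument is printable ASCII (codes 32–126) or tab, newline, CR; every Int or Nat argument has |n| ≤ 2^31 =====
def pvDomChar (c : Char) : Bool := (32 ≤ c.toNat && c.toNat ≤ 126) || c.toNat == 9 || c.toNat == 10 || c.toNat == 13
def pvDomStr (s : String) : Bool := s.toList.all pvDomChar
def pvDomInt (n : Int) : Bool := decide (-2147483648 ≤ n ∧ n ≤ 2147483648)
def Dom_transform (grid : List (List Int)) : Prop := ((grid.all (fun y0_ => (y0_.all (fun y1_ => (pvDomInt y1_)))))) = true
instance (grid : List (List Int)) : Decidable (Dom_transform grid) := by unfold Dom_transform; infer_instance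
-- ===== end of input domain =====

-- B replaces A's single stateful DFS sweep (global visited matrix + explicit stack) by an
-- independent per-cell fixed-point saturation of each component; objective: alternative (not faster).

-- 2-D read m[x][y] / write m[x][y] = v; exact for Python at indices both programs use,
-- which are always bounds-checked (0 ≤ x < len(m), 0 ≤ y < len(m[x])) before access.
def get2 {α : Type} (d : α) (m : List (List α)) (x y : Int) : α :=
  if 0 ≤ x ∧ 0 ≤ y then (((m[x.toNat]?).getD [])[y.toNat]?).getD d else d

def set2 {α : Type} (m : List (List α)) (x y : Int) (v : α) : List (List α) :=
  if 0 ≤ x ∧ 0 ≤ y then m.set x.toNat (((m[x.toNat]?).getD []).set y.toNat v) else m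

-- ===== PORT A =====
def dirsA : List (Int × Int) := [(-1, 0), (1, 0), (0, -1), (0, 1)]

-- body of "for dx, dy in dirs" for the popped cell (x, y); state = (visited, stack)
def dirStep (grid : List (List Int)) (h w x y : Int)
    (st : List (List Bool) × List (Int × Int)) (d : Int × Int) :
    List (List Bool) × List (Int × Int) :=
  let nx := x + d.1
  let ny := y + d.2
  if 0 ≤ nx ∧ nx < h ∧ 0 ≤ ny ∧ ny < w then
    if get2 false st.1 nx ny = false ∧ get2 0 grid nx ny = 5 then
      (set2 st.1 nx ny true, (nx, ny) :: st.2)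
    else st
  else st

-- the "while stack:" loop; stack's top is the list head (Python appends/pops at the end).
-- fuel only makes the loop structurally terminating; it is provably never exhausted.
def dfsA (grid : List (List Int)) (h w : Int) :
    Nat → List (Int × Int) → List (List Bool) → List (Int × Int) →
    List (List Bool) × List (Int × Int)
  | 0, _, vis, comp => (vis, comp)
  | _ + 1, [], vis, comp => (vis, comp)
  | fuel + 1, (x, y) :: rest, vis, comp =>
      let st := dirsA.foldl (dirStep grid h w x y) (vis, rest)
      dfsA grid h w fuel st.2 st.1 (comp ++ [(x, y)])

-- body of the nested "for r … for c …"; state = (out, visited)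
def cellA (grid : List (List Int)) (h w : Int)
    (st : List (List Int) × List (List Bool)) (r c : Int) :
    List (List Int) × List (List Bool) :=
  if get2 0 grid r c = 5 ∧ get2 false st.2 r c = false then
    let res := dfsA grid h w (2 * (h.toNat * w.toNat) + 1) [(r, c)] (set2 st.2 r c true) []
    let colour : Int := if res.2.length = 6 then 2 else 1
    (res.2.foldl (fun o p => set2 o p.1 p.2 colour) st.1, res.1)
  else st

def transform (grid : List (List Int)) : List (List Int) :=
  let h : Int := grid.length
  let w : Int := ((grid.headD []).length : Int)   -- len(grid[0]) if h else 0
  -- out = [row[:] for row in grid] is just grid in a pure language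
  let vis0 : List (List Bool) := List.replicate grid.length (List.replicate w.toNat false)
  ((PySem.List.pyRange 0 h 1).foldl
    (fun st r => (PySem.List.pyRange 0 w 1).foldl (fun st c => cellA grid h w st r c) st)
    (grid, vis0)).1

-- ===== PORT B =====
def fiveB (grid : List (List Int)) (h w r c : Int) : Bool :=
  decide (0 ≤ r ∧ r < h ∧ 0 ≤ c ∧ c < w) && (get2 0 grid r c == 5)

def nbrsB (p : Int × Int) : List (Int × Int) :=
  [(p.1 - 1, p.2), (p.1 + 1, p.2), (p.1, p.2 - 1), (p.1, p.2 + 1)]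

-- grown = cells | {neighbours of cells that are 5}
def growB (grid : List (List Int)) (h w : Int) (cells : PySem.Set (Int × Int)) :
    PySem.Set (Int × Int) :=
  PySem.Set.union cells ((cells.flatMap nbrsB).filter (fun q => fiveB grid h w q.1 q.2))

-- the "while True:" loop; fuel only makes it structurally terminating (the set grows
-- strictly while the loop continues and is bounded by h*w cells, so fuel never runs out).
def satB (grid : List (List Int)) (h w : Int) : Nat → PySem.Set (Int × Int) → Int
  | 0, cells => PySem.Set.len cells
  | fuel + 1, cells =>
      let grown := growB grid h w cells
      if PySem.Set.len grown = PySem.Set.len cells then PySem.Set.len cells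
      else satB grid h w fuel grown

def compSizeB (grid : List (List Int)) (h w r c : Int) : Int :=
  satB grid h w (h.toNat * w.toNat + 1) (PySem.Set.ofList [(r, c)])

-- one output row: [(2 if component_size(r,c)==6 else 1) if five(r,c) else v for c, v in enumerate(row)]
def rowAlt (grid : List (List Int)) (h w r : Int) (row : List Int) : List Int :=
  (PySem.List.enumerate row 0).map (fun cv =>
    if fiveB grid h w r cv.1 then (if compSizeB grid h w r cv.1 = 6 then 2 else 1) else cv.2)

def transform_alt (grid : List (List Int)) : List (List Int) :=
  let h : Int := grid.length
  let w : Int := ((grid.headD []).length : Int)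
  (PySem.List.enumerate grid 0).map (fun rrow => rowAlt grid h w rrow.1 rrow.2)

-- ===== PRECONDITION & SPEC =====
-- Pre_ excludes exactly the grids with a row shorter than row 0: A's column scan over
-- range(len(grid[0])) raises IndexError on every such grid.
def Pre_transform (grid : List (List Int)) : Prop :=
  ∀ row ∈ grid, (grid.headD []).length ≤ row.length
instance (grid : List (List Int)) : Decidable (Pre_transform grid) := by
  unfold Pre_transform; infer_instance

def pvWitness_transform : List (List Int) :=
  [[5, 5, 0], [0, 5, 5], [5, 0, 5]]

def Spec_transform (grid : List (List Int)) (out : List (List Int)) : Prop := out = transform_alt grid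
instance (grid : List (List Int)) (out : List (List Int)) : Decidable (Spec_transform grid out) := by unfold Spec_transform; infer_instance

-- ===== CLAIM (what is proved, stated in full; the proofs are below) =====
def Claim_equal_transform : Prop := ∀ (grid : List (List Int)), Dom_transform grid → Pre_transform grid → Spec_transform grid (transform grid)

-- ===== LEMMAS AND PROOFS =====

-- neighbour relation is symmetric
lemma nbrsB_symm (p q : Int × Int) : q ∈ nbrsB p ↔ p ∈ nbrsB q := by
  simp only [nbrsB, List.mem_cons, List.not_mem_nil, or_false, Prod.ext_iff]
  constructor <;> (intro h; omega)

-- proof-layer vocabulary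
def hI (g : List (List Int)) : Int := (g.length : Int)
def wI (g : List (List Int)) : Int := ((g.headD []).length : Int)

def FiveP (g : List (List Int)) (p : Int × Int) : Prop :=
  fiveB g (hI g) (wI g) p.1 p.2 = true

def AdjP (g : List (List Int)) (p q : Int × Int) : Prop :=
  FiveP g p ∧ FiveP g q ∧ q ∈ nbrsB p

def ReachP (g : List (List Int)) (p q : Int × Int) : Prop :=
  Relation.ReflTransGen (AdjP g) p q

noncomputable def CompCard (g : List (List Int)) (p : Int × Int) : Nat :=
  {q | ReachP g p q}.ncard

noncomputable def colourOf (g : List (List Int)) (p : Int × Int) : Int :=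
  if CompCard g p = 6 then 2 else 1

def GShape {α : Type} (m : List (List α)) (H W : Nat) : Prop :=
  m.length = H ∧ ∀ (i : Nat) (row : List α), m[i]? = some row → row.length = W

def VisSet (vis : List (List Bool)) : Set (Int × Int) :=
  {p | get2 false vis p.1 p.2 = true}

def CellsL (H W : Nat) : List (Int × Int) :=
  ((List.range H).product (List.range W)).map (fun rc => ((rc.1 : Int), (rc.2 : Int)))

def UnvisCount (g : List (List Int)) (vis : List (List Bool)) : Nat :=
  ((CellsL g.length (g.headD []).length).filter
    (fun p => fiveB g (hI g) (wI g) p.1 p.2 && !(get2 false vis p.1 p.2))).length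

def RLen (m : List (List Int)) (i : Nat) : Nat := ((m[i]?).getD []).length

def OShape (m g : List (List Int)) : Prop :=
  m.length = g.length ∧ ∀ i : Nat, RLen m i = RLen g i

def OInv (g : List (List Int)) (st : List (List Int) × List (List Bool)) : Prop :=
  OShape st.1 g ∧
  GShape st.2 g.length (g.headD []).length ∧
  (∀ p ∈ VisSet st.2, FiveP g p) ∧
  (∀ p ∈ VisSet st.2, ∀ q, ReachP g p q → q ∈ VisSet st.2) ∧
  (∀ a b : Int, 0 ≤ a → a < hI g → 0 ≤ b → b.toNat < RLen g a.toNat →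
    ((a, b) ∈ VisSet st.2 → get2 0 st.1 a b = colourOf g (a, b)) ∧
    ((a, b) ∉ VisSet st.2 → get2 0 st.1 a b = get2 0 g a b))

-- basic relation facts
lemma adjP_symm (g : List (List Int)) {p q : Int × Int} (h : AdjP g p q) : AdjP g q p := by
  exact ⟨h.2.1, h.1, (nbrsB_symm q p).mpr h.2.2⟩

lemma reachP_symm (g : List (List Int)) {p q : Int × Int} (h : ReachP g p q) : ReachP g q p :=
  (Relation.ReflTransGen.symmetric (fun _ _ hh => adjP_symm g hh)) h

lemma reachP_trans (g : List (List Int)) {p q r : Int × Int}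
    (h1 : ReachP g p q) (h2 : ReachP g q r) : ReachP g p r := h1.trans h2

lemma compCard_congr (g : List (List Int)) {s q : Int × Int} (h : ReachP g s q) :
    CompCard g q = CompCard g s := by
  unfold CompCard
  congr 1
  ext x
  exact ⟨fun hx => reachP_trans g h hx, fun hx => reachP_trans g (reachP_symm g h) hx⟩

lemma colourOf_congr (g : List (List Int)) {s q : Int × Int} (h : ReachP g s q) :
    colourOf g q = colourOf g s := by
  unfold colourOf; rw [compCard_congr g h]

lemma card_eq_length (g : List (List Int)) (s : Int × Int) (L : List (Int × Int))
    (hnd : L.Nodup) (hm : ∀ x, x ∈ L ↔ ReachP g s x) : L.length = CompCard g s := by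
  have hset : {q | ReachP g s q} = (↑L.toFinset : Set (Int × Int)) := by
    ext x
    simp [hm x]
  unfold CompCard
  rw [hset, Set.ncard_coe_finset, List.toFinset_card_of_nodup hnd]

lemma reach_in_closed (g : List (List Int)) (S : List (Int × Int)) (seed : Int × Int)
    (hseed : seed ∈ S) (hcl : ∀ a ∈ S, ∀ b, AdjP g a b → b ∈ S) :
    ∀ q, ReachP g seed q → q ∈ S := by
  intro q h
  induction h with
  | refl => exact hseed
  | tail _ hadj ih => exact hcl _ ih _ hadj

-- 2-D accessor facts
lemma gshape_set2 {α : Type} {m : List (List α)} {H W : Nat} (hsh : GShape m H W)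
    (x y : Int) (v : α) : GShape (set2 m x y v) H W := by
  obtain ⟨hlen, hrow⟩ := hsh
  unfold set2
  split
  · refine ⟨by simpa using hlen, ?_⟩
    intro i row hr
    rw [List.getElem?_set] at hr
    split at hr
    · split at hr
      · rename_i hix hlt
        have hm : m[x.toNat]? = some m[x.toNat] := List.getElem?_eq_getElem hlt
        have hW := hrow x.toNat m[x.toNat] hm
        cases hr
        simp [hm, hW]
      · exact absurd hr (by simp)
    · exact hrow i row hr
  · exact ⟨hlen, hrow⟩

lemma get2_set2 {α : Type} (d v : α) {m : List (List α)}
    {x y : Int} (hx0 : 0 ≤ x) (hy0 : 0 ≤ y) (hxlt : x.toNat < m.length)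
    (hylt : y.toNat < ((m[x.toNat]?).getD []).length) (a b : Int) :
    get2 d (set2 m x y v) a b = if a = x ∧ b = y then v else get2 d m a b := by
  have hm : m[x.toNat]? = some m[x.toNat] := List.getElem?_eq_getElem hxlt
  by_cases hab : 0 ≤ a ∧ 0 ≤ b
  · have hL : get2 d (set2 m x y v) a b =
        ((m.set x.toNat ((m[x.toNat]?.getD []).set y.toNat v))[a.toNat]?.getD [])[b.toNat]?.getD d := by
      unfold get2 set2
      rw [if_pos hab, if_pos ⟨hx0, hy0⟩]
    have hR : get2 d m a b = (m[a.toNat]?.getD [])[b.toNat]?.getD d := by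
      unfold get2
      rw [if_pos hab]
    rw [hL, List.getElem?_set]
    by_cases hax : a = x
    · rw [if_pos (by omega : x.toNat = a.toNat), if_pos hxlt]
      simp only [Option.getD_some]
      rw [List.getElem?_set]
      by_cases hby : b = y
      · rw [if_pos (by omega : y.toNat = b.toNat), if_pos hylt]
        simp [hax, hby]
      · rw [if_neg (by omega : ¬ y.toNat = b.toNat),
          if_neg (by simp [hax, hby] : ¬ (a = x ∧ b = y)), hR]
        rw [show a.toNat = x.toNat by omega]
    · rw [if_neg (by omega : ¬ x.toNat = a.toNat),
        if_neg (by simp [hax] : ¬ (a = x ∧ b = y)), hR]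
  · have hd : ∀ (mm : List (List α)), get2 d mm a b = d := by
      intro mm; unfold get2; rw [if_neg hab]
    rw [hd, if_neg (by rintro ⟨rfl, rfl⟩; exact hab ⟨hx0, hy0⟩), hd]

lemma set2_rowlen {α : Type} (m : List (List α)) (x y : Int) (v : α) :
    (set2 m x y v).length = m.length ∧
    ∀ i : Nat, (((set2 m x y v)[i]?).getD []).length = ((m[i]?).getD []).length := by
  unfold set2
  split
  · refine ⟨List.length_set, ?_⟩
    intro i
    rw [List.getElem?_set]
    by_cases hxi : x.toNat = i
    · rw [if_pos hxi]
      by_cases hlt : x.toNat < m.length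
      · rw [if_pos hlt, ← hxi]
        simp
      · rw [if_neg hlt, ← hxi, List.getElem?_eq_none (show m.length ≤ x.toNat by omega)]
    · rw [if_neg hxi]
  · exact ⟨rfl, fun _ => rfl⟩

lemma gshape_rowlen {α : Type} {m : List (List α)} {H W : Nat} (hsh : GShape m H W)
    {i : Nat} (hi : i < H) :
    i < m.length ∧ ((m[i]?).getD []).length = W := by
  obtain ⟨hl, hr⟩ := hsh
  have hlt : i < m.length := by omega
  have hm : m[i]? = some m[i] := List.getElem?_eq_getElem hlt
  exact ⟨hlt, by rw [hm]; exact hr i m[i] hm⟩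

lemma pre_rowlen {g : List (List Int)} (hPre : Pre_transform g) {i : Nat} (hi : i < g.length) :
    (g.headD []).length ≤ RLen g i := by
  have hm : g[i]? = some g[i] := List.getElem?_eq_getElem hi
  unfold RLen
  rw [hm]
  exact hPre g[i] (g.getElem_mem hi)

lemma ext2 (m1 m2 g : List (List Int)) (h1 : OShape m1 g) (h2 : OShape m2 g)
    (h : ∀ a b : Int, 0 ≤ a → a < (g.length : Int) → 0 ≤ b → b.toNat < RLen g a.toNat →
      get2 0 m1 a b = get2 0 m2 a b) : m1 = m2 := by
  obtain ⟨hl1, hr1⟩ := h1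
  obtain ⟨hl2, hr2⟩ := h2
  apply List.ext_getElem (by omega)
  intro i hi1 hi2
  have hm1 : m1[i]? = some m1[i] := List.getElem?_eq_getElem hi1
  have hm2 : m2[i]? = some m2[i] := List.getElem?_eq_getElem hi2
  have hrl1 : m1[i].length = RLen g i := by
    have := hr1 i
    rw [RLen, hm1] at this
    simpa using this
  have hrl2 : m2[i].length = RLen g i := by
    have := hr2 i
    rw [RLen, hm2] at this
    simpa using this
  apply List.ext_getElem (by omega)
  intro j hj1 hj2
  have hg := h (i : Int) (j : Int) (by omega) (by omega) (by omega) (by simp; omega)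
  unfold get2 at hg
  rw [if_pos ⟨by omega, by omega⟩] at hg
  simpa [hm1, hm2, List.getElem?_eq_getElem, hj1, hj2] using hg

lemma visSet_set2 {vis : List (List Bool)} {x y : Int}
    (hx0 : 0 ≤ x) (hy0 : 0 ≤ y) (hxlt : x.toNat < vis.length)
    (hylt : y.toNat < ((vis[x.toNat]?).getD []).length) :
    ∀ p, p ∈ VisSet (set2 vis x y true) ↔ p ∈ VisSet vis ∨ p = (x, y) := by
  intro p
  show get2 false (set2 vis x y true) p.1 p.2 = true ↔ _
  rw [get2_set2 false true hx0 hy0 hxlt hylt]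
  by_cases hp : p.1 = x ∧ p.2 = y
  · simp [hp, Prod.ext_iff, VisSet, Set.mem_setOf_eq]
  · simp only [if_neg hp]
    constructor
    · intro hh; exact Or.inl hh
    · rintro (hh | hh)
      · exact hh
      · exact absurd ⟨by rw [hh], by rw [hh]⟩ hp

-- cells enumeration
lemma mem_CellsL {H W : Nat} (p : Int × Int) :
    p ∈ CellsL H W ↔ 0 ≤ p.1 ∧ p.1 < (H : Int) ∧ 0 ≤ p.2 ∧ p.2 < (W : Int) := by
  constructor
  · intro hp
    simp only [CellsL, List.mem_map] at hp
    obtain ⟨⟨r, c⟩, hrc, rfl⟩ := hp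
    have hmem : r ∈ List.range H ∧ c ∈ List.range W :=
      (List.pair_mem_product).mp hrc
    simp only [List.mem_range] at hmem
    refine ⟨?_, ?_, ?_, ?_⟩ <;> dsimp only <;> omega
  · rintro ⟨h1, h2, h3, h4⟩
    simp only [CellsL, List.mem_map]
    refine ⟨(p.1.toNat, p.2.toNat), ?_, ?_⟩
    · refine (List.pair_mem_product).mpr ⟨?_, ?_⟩
      · rw [List.mem_range]; omega
      · rw [List.mem_range]; omega
    · dsimp only
      rw [show ((p.1.toNat : Int)) = p.1 by omega, show ((p.2.toNat : Int)) = p.2 by omega]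

lemma nodup_CellsL (H W : Nat) : (CellsL H W).Nodup := by
  unfold CellsL
  refine List.Nodup.map ?_ (List.Nodup.product (List.nodup_range) (List.nodup_range))
  intro a b hab
  simp only [Prod.mk.injEq, Nat.cast_inj] at hab
  exact Prod.ext hab.1 hab.2

lemma length_CellsL (H W : Nat) : (CellsL H W).length = H * W := by
  have hsp : (List.range H).product (List.range W) = (List.range H) ×ˢ (List.range W) := rfl
  rw [CellsL, List.length_map, hsp, List.length_product, List.length_range, List.length_range]

lemma nodup_bound {H W : Nat} (l : List (Int × Int)) (hnd : l.Nodup)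
    (hsub : ∀ p ∈ l, 0 ≤ p.1 ∧ p.1 < (H : Int) ∧ 0 ≤ p.2 ∧ p.2 < (W : Int)) :
    l.length ≤ H * W := by
  have hsp : l.Subperm (CellsL H W) :=
    List.Nodup.subperm hnd (fun p hp => (mem_CellsL p).mpr (hsub p hp))
  calc l.length ≤ (CellsL H W).length := hsp.length_le
    _ = H * W := length_CellsL H W

lemma five_bounds {g : List (List Int)} {p : Int × Int} (h : FiveP g p) :
    0 ≤ p.1 ∧ p.1 < hI g ∧ 0 ≤ p.2 ∧ p.2 < wI g := by
  have := h
  unfold FiveP fiveB at this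
  simp only [Bool.and_eq_true, decide_eq_true_eq] at this
  exact this.1

lemma five_val {g : List (List Int)} {p : Int × Int} (h : FiveP g p) :
    get2 0 g p.1 p.2 = 5 := by
  have := h
  unfold FiveP fiveB at this
  simp only [Bool.and_eq_true, decide_eq_true_eq, beq_iff_eq] at this
  exact this.2

lemma five_iff {g : List (List Int)} {a b : Int} (ha0 : 0 ≤ a) (haH : a < hI g)
    (hb0 : 0 ≤ b) (hbW : b < wI g) :
    FiveP g (a, b) ↔ get2 0 g a b = 5 := by
  unfold FiveP fiveB
  simp only [Bool.and_eq_true, decide_eq_true_eq, beq_iff_eq]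
  constructor
  · exact fun h => h.2
  · exact fun h => ⟨⟨ha0, haH, hb0, hbW⟩, h⟩

-- counting
lemma filter_length_update {α : Type} [DecidableEq α] :
    ∀ (l : List α), l.Nodup → ∀ (n : α), n ∈ l → ∀ (p q : α → Bool),
    (∀ x ∈ l, x ≠ n → p x = q x) → p n = true → q n = false →
    (l.filter p).length = (l.filter q).length + 1 := by
  intro l hnd
  induction l with
  | nil => intro n hn; exact absurd hn (List.not_mem_nil)
  | cons a t ih =>
    intro n hn p q hpq hp hq
    have hnd' : a ∉ t ∧ t.Nodup := by simpa [List.nodup_cons] using hnd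
    by_cases hna : a = n
    · subst hna
      rw [List.filter_cons_of_pos hp, List.filter_cons_of_neg (by simp [hq])]
      have : t.filter p = t.filter q := by
        apply List.filter_congr
        intro x hx
        exact hpq x (List.mem_cons_of_mem a hx) (fun hxa => hnd'.1 (hxa ▸ hx))
      simp [this]
    · have hnt : n ∈ t := by
        rcases List.mem_cons.mp hn with h | h
        · exact absurd h.symm hna
        · exact h
      have hpa : p a = q a := hpq a List.mem_cons_self hna
      have ihh := ih hnd'.2 n hnt p q
        (fun x hx hxn => hpq x (List.mem_cons_of_mem a hx) hxn) hp hq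
      cases hqa : q a
      · rw [List.filter_cons_of_neg (by simp [hpa, hqa]),
          List.filter_cons_of_neg (by simp [hqa])]
        exact ihh
      · rw [List.filter_cons_of_pos (by simp [hpa, hqa]),
          List.filter_cons_of_pos (by simp [hqa])]
        simpa using ihh

lemma unvisCount_le (g : List (List Int)) (vis : List (List Bool)) :
    UnvisCount g vis ≤ g.length * (g.headD []).length := by
  unfold UnvisCount
  calc _ ≤ (CellsL g.length (g.headD []).length).length := List.length_filter_le _ _
    _ = _ := length_CellsL _ _

lemma unvis_set2 (g : List (List Int)) {vis : List (List Bool)}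
    (hsh : GShape vis g.length (g.headD []).length) {x y : Int}
    (hfive : FiveP g (x, y)) (hunvis : get2 false vis x y = false) :
    UnvisCount g (set2 vis x y true) + 1 = UnvisCount g vis := by
  have hb := five_bounds hfive
  simp only [hI, wI] at hb
  have hrow := gshape_rowlen hsh (show x.toNat < g.length by omega)
  have hxlt : x.toNat < vis.length := hrow.1
  have hylt : y.toNat < ((vis[x.toNat]?).getD []).length := by rw [hrow.2]; omega
  unfold UnvisCount
  rw [filter_length_update (CellsL g.length (g.headD []).length)
    (nodup_CellsL _ _) (x, y) ((mem_CellsL _).mpr hb)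
    (fun p => fiveB g (hI g) (wI g) p.1 p.2 && !(get2 false vis p.1 p.2))
    (fun p => fiveB g (hI g) (wI g) p.1 p.2 && !(get2 false (set2 vis x y true) p.1 p.2))
    ?_ ?_ ?_]
  · intro p _ hpn
    dsimp only
    rw [get2_set2 false true hb.1 hb.2.2.1 hxlt hylt p.1 p.2,
      if_neg (by rintro ⟨h1, h2⟩; exact hpn (Prod.ext h1 h2))]
  · simp only [Bool.and_eq_true, Bool.not_eq_true']
    exact ⟨hfive, hunvis⟩
  · have := get2_set2 false true hb.1 hb.2.2.1 hxlt hylt x y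
    rw [if_pos ⟨rfl, rfl⟩] at this
    simp [this]

-- dirs vs neighbours
lemma dirs_to_nbrs (x y : Int) {d : Int × Int} (hd : d ∈ dirsA) :
    (x + d.1, y + d.2) ∈ nbrsB (x, y) := by
  fin_cases hd <;> simp [nbrsB, Prod.ext_iff] <;> omega

lemma nbrs_to_dirs (x y : Int) {q : Int × Int} (hq : q ∈ nbrsB (x, y)) :
    ∃ d ∈ dirsA, q = (x + d.1, y + d.2) := by
  simp only [nbrsB, List.mem_cons, List.not_mem_nil, or_false] at hq
  rcases hq with h | h | h | h
  · exact ⟨(-1, 0), by simp [dirsA], by rw [h]; congr 1; omega⟩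
  · exact ⟨(1, 0), by simp [dirsA], by rw [h]; congr 1; omega⟩
  · exact ⟨(0, -1), by simp [dirsA], by rw [h]; congr 1; omega⟩
  · exact ⟨(0, 1), by simp [dirsA], by rw [h]; congr 1; omega⟩

-- the inner "for dx, dy in dirs" fold
lemma dirFold_spec (g : List (List Int)) (x y : Int) :
    ∀ (ds : List (Int × Int)) (vis : List (List Bool)) (st : List (Int × Int)),
    GShape vis g.length (g.headD []).length →
    ∃ new : List (Int × Int),
      (ds.foldl (dirStep g (hI g) (wI g) x y) (vis, st)).2 = new ++ st ∧
      GShape (ds.foldl (dirStep g (hI g) (wI g) x y) (vis, st)).1 g.length (g.headD []).length ∧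
      new.Nodup ∧
      (∀ p ∈ new, FiveP g p ∧ (∃ d ∈ ds, p = (x + d.1, y + d.2)) ∧ p ∉ VisSet vis) ∧
      (∀ p, p ∈ VisSet (ds.foldl (dirStep g (hI g) (wI g) x y) (vis, st)).1 ↔
        p ∈ VisSet vis ∨ p ∈ new) ∧
      UnvisCount g (ds.foldl (dirStep g (hI g) (wI g) x y) (vis, st)).1 + new.length =
        UnvisCount g vis ∧
      (∀ d ∈ ds, FiveP g (x + d.1, y + d.2) →
        (x + d.1, y + d.2) ∈ VisSet (ds.foldl (dirStep g (hI g) (wI g) x y) (vis, st)).1) := by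
  intro ds
  induction ds with
  | nil =>
    intro vis st hsh
    refine ⟨[], by simp, by simpa using hsh, List.nodup_nil, ?_, ?_, by simp, ?_⟩
    · intro p hp
      exact absurd hp (List.not_mem_nil)
    · intro p
      simp
    · intro d hd
      exact absurd hd (List.not_mem_nil)
  | cons d ds ih =>
    intro vis st hsh
    rw [List.foldl_cons]
    by_cases hbnd : 0 ≤ x + d.1 ∧ x + d.1 < hI g ∧ 0 ≤ y + d.2 ∧ y + d.2 < wI g
    · by_cases hchk : get2 false vis (x + d.1) (y + d.2) = false ∧ get2 0 g (x + d.1) (y + d.2) = 5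
      · -- the neighbour is marked and pushed
        have hds : dirStep g (hI g) (wI g) x y (vis, st) d =
            (set2 vis (x + d.1) (y + d.2) true, (x + d.1, y + d.2) :: st) := by
          unfold dirStep
          rw [if_pos hbnd, if_pos hchk]
        have hfive : FiveP g (x + d.1, y + d.2) :=
          (five_iff hbnd.1 hbnd.2.1 hbnd.2.2.1 hbnd.2.2.2).mpr hchk.2
        have hsh1 : GShape (set2 vis (x + d.1) (y + d.2) true) g.length (g.headD []).length :=
          gshape_set2 hsh _ _ _
        have hrowb := gshape_rowlen hsh (show (x + d.1).toNat < g.length by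
          have := hbnd.2.1; unfold hI at this; omega)
        have hvs1 := visSet_set2 hbnd.1 hbnd.2.2.1 hrowb.1
          (by rw [hrowb.2]; have := hbnd.2.2.2; unfold wI at this; omega)
        have hcnt1 := unvis_set2 g hsh hfive hchk.1
        obtain ⟨new', hst', hshF, hnd', hmem', hvisF, hcntF, hpostF⟩ :=
          ih (set2 vis (x + d.1) (y + d.2) true) ((x + d.1, y + d.2) :: st) hsh1
        rw [hds]
        have hxyV1 : (x + d.1, y + d.2) ∈ VisSet (set2 vis (x + d.1) (y + d.2) true) :=
          (hvs1 _).mpr (Or.inr rfl)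
        have hxyNV : (x + d.1, y + d.2) ∉ VisSet vis := by
          intro hmem
          have hm2 : get2 false vis (x + d.1) (y + d.2) = true := hmem
          rw [hchk.1] at hm2
          cases hm2
        refine ⟨new' ++ [(x + d.1, y + d.2)], ?_, hshF, ?_, ?_, ?_, ?_, ?_⟩
        · rw [hst']
          simp
        · refine (List.nodup_append).mpr ⟨hnd', List.nodup_singleton _, fun p hp q hq => ?_⟩
          have hqe : q = (x + d.1, y + d.2) := by simpa using hq
          intro hpq
          exact (hmem' p hp).2.2 (by rw [hpq, hqe]; exact hxyV1)
        · intro p hp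
          rcases List.mem_append.mp hp with h | h
          · obtain ⟨hf, ⟨d', hd', he⟩, hnv⟩ := hmem' p h
            exact ⟨hf, ⟨d', List.mem_cons_of_mem d hd', he⟩,
              fun hv => hnv ((hvs1 p).mpr (Or.inl hv))⟩
          · rw [List.mem_singleton] at h
            subst h
            exact ⟨hfive, ⟨d, List.mem_cons_self, rfl⟩, hxyNV⟩
        · intro p
          rw [hvisF p, hvs1 p, List.mem_append, List.mem_singleton]
          tauto

        · rw [List.length_append, List.length_singleton]
          omega
        · intro d' hd' hf
          rcases List.mem_cons.mp hd' with h | h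
          · subst h
            exact (hvisF _).mpr (Or.inl hxyV1)
          · exact hpostF d' h hf
      · -- neighbour already visited or not a 5: no-op
        have hds : dirStep g (hI g) (wI g) x y (vis, st) d = (vis, st) := by
          unfold dirStep
          rw [if_pos hbnd, if_neg hchk]
        rw [hds]
        obtain ⟨new, h1, h2, h3, h4, h5, h6, h7⟩ := ih vis st hsh
        refine ⟨new, h1, h2, h3, ?_, h5, h6, ?_⟩
        · intro p hp
          obtain ⟨hf, ⟨d', hd', he⟩, hnv⟩ := h4 p hp
          exact ⟨hf, ⟨d', List.mem_cons_of_mem d hd', he⟩, hnv⟩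
        · intro d' hd' hf
          rcases List.mem_cons.mp hd' with rfl | h
          · have h5v := five_val hf
            have hvtrue : get2 false vis (x + d'.1) (y + d'.2) = true := by
              rcases Bool.eq_false_or_eq_true (get2 false vis (x + d'.1) (y + d'.2)) with hb | hb
              · exact hb
              · exact absurd ⟨hb, h5v⟩ hchk
            exact (h5 _).mpr (Or.inl hvtrue)
          · exact h7 d' h hf
    · -- out of bounds: no-op, and the neighbour cannot be a 5-cell
      have hds : dirStep g (hI g) (wI g) x y (vis, st) d = (vis, st) := by
        unfold dirStep
        rw [if_neg hbnd]
      rw [hds]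
      obtain ⟨new, h1, h2, h3, h4, h5, h6, h7⟩ := ih vis st hsh
      refine ⟨new, h1, h2, h3, ?_, h5, h6, ?_⟩
      · intro p hp
        obtain ⟨hf, ⟨d', hd', he⟩, hnv⟩ := h4 p hp
        exact ⟨hf, ⟨d', List.mem_cons_of_mem d hd', he⟩, hnv⟩
      · intro d' hd' hf
        rcases List.mem_cons.mp hd' with h | h
        · subst h
          exact absurd (by simpa using five_bounds hf) hbnd
        · exact h7 d' h hf

-- the "while stack:" loop
lemma dfsA_spec (g : List (List Int)) (seed : Int × Int) (V0 : Int × Int → Prop) :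
    ∀ (fuel : Nat) (stack comp : List (Int × Int)) (vis : List (List Bool)),
    GShape vis g.length (g.headD []).length →
    (∀ p ∈ comp ++ stack, FiveP g p ∧ ReachP g seed p ∧ ¬ V0 p) →
    (comp ++ stack).Nodup →
    (∀ p, p ∈ VisSet vis ↔ V0 p ∨ p ∈ comp ++ stack) →
    (∀ p ∈ comp, ∀ q, AdjP g p q → q ∈ VisSet vis) →
    stack.length + 2 * UnvisCount g vis ≤ fuel →
    GShape (dfsA g (hI g) (wI g) fuel stack vis comp).1 g.length (g.headD []).length ∧
    (dfsA g (hI g) (wI g) fuel stack vis comp).2.Nodup ∧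
    (∀ p ∈ (dfsA g (hI g) (wI g) fuel stack vis comp).2, FiveP g p ∧ ReachP g seed p ∧ ¬ V0 p) ∧
    (∀ p ∈ comp ++ stack, p ∈ (dfsA g (hI g) (wI g) fuel stack vis comp).2) ∧
    (∀ p, p ∈ VisSet (dfsA g (hI g) (wI g) fuel stack vis comp).1 ↔
      V0 p ∨ p ∈ (dfsA g (hI g) (wI g) fuel stack vis comp).2) ∧
    (∀ p ∈ (dfsA g (hI g) (wI g) fuel stack vis comp).2, ∀ q, AdjP g p q →
      q ∈ VisSet (dfsA g (hI g) (wI g) fuel stack vis comp).1) := by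
  intro fuel
  induction fuel with
  | zero =>
    intro stack comp vis hsh hfr hnd hvis hcl hfuel
    have hstack : stack = [] := by
      cases stack with
      | nil => rfl
      | cons a t => simp only [List.length_cons] at hfuel; omega
    subst hstack
    have hres : dfsA g (hI g) (wI g) 0 [] vis comp = (vis, comp) := rfl
    rw [hres]
    refine ⟨hsh, by simpa using hnd, ?_, ?_, ?_, hcl⟩
    · intro p hp
      exact hfr p (by simpa using hp)
    · intro p hp
      simpa using hp
    · intro p
      rw [hvis p]
      simp
  | succ f ih =>
    intro stack comp vis hsh hfr hnd hvis hcl hfuel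
    cases stack with
    | nil =>
      have hres : dfsA g (hI g) (wI g) (f + 1) [] vis comp = (vis, comp) := rfl
      rw [hres]
      refine ⟨hsh, by simpa using hnd, ?_, ?_, ?_, hcl⟩
      · intro p hp
        exact hfr p (by simpa using hp)
      · intro p hp
        simpa using hp
      · intro p
        rw [hvis p]
        simp
    | cons xy rest =>
      obtain ⟨x, y⟩ := xy
      have hstep : dfsA g (hI g) (wI g) (f + 1) ((x, y) :: rest) vis comp =
          dfsA g (hI g) (wI g) f
            (dirsA.foldl (dirStep g (hI g) (wI g) x y) (vis, rest)).2
            (dirsA.foldl (dirStep g (hI g) (wI g) x y) (vis, rest)).1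
            (comp ++ [(x, y)]) := rfl
      obtain ⟨new, hst2, hshF, hndnew, hmemnew, hvisF, hcntF, hpostF⟩ :=
        dirFold_spec g x y dirsA vis rest hsh
      have hxy := hfr (x, y) (by simp)
      -- facts about the fresh pushes
      have hnewfacts : ∀ p ∈ new, FiveP g p ∧ ReachP g seed p ∧ ¬ V0 p := by
        intro p hp
        obtain ⟨hf, ⟨d, hd, he⟩, hnv⟩ := hmemnew p hp
        have hadj : AdjP g (x, y) p := ⟨hxy.1, hf, by rw [he]; exact dirs_to_nbrs x y hd⟩
        exact ⟨hf, hxy.2.1.trans (Relation.ReflTransGen.single hadj),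
          fun hv0 => hnv ((hvis p).mpr (Or.inl hv0))⟩
      have hinVis : ∀ p, p ∈ comp ++ (x, y) :: rest → p ∈ VisSet vis :=
        fun p hp => (hvis p).mpr (Or.inr hp)
      have hnewfresh : ∀ p ∈ new, p ∉ comp ++ (x, y) :: rest := by
        intro p hp hmem
        exact (hmemnew p hp).2.2 (hinVis p hmem)
      -- nodup of the new configuration
      have hnd' : ((comp ++ [(x, y)]) ++ (new ++ rest)).Nodup := by
        have hperm : ((comp ++ [(x, y)]) ++ (new ++ rest)).Perm
            ((comp ++ (x, y) :: rest) ++ new) := by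
          have h1 : (comp ++ [(x, y)]) ++ (new ++ rest) =
              comp ++ ((x, y) :: (new ++ rest)) := by simp
          have h2 : (comp ++ (x, y) :: rest) ++ new =
              comp ++ ((x, y) :: (rest ++ new)) := by simp
          rw [h1, h2]
          exact List.Perm.append_left comp
            (List.Perm.cons (x, y) (List.perm_append_comm))
        refine hperm.nodup_iff.mpr ?_
        rw [List.nodup_append]
        refine ⟨hnd, hndnew, ?_⟩
        intro p hp q hq hpq
        exact hnewfresh q hq (hpq ▸ hp)
      have ihres := ih (new ++ rest) (comp ++ [(x, y)])
        (dirsA.foldl (dirStep g (hI g) (wI g) x y) (vis, rest)).1 hshF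
        ?_ ?_ ?_ ?_ ?_
      · rw [hstep, hst2]
        obtain ⟨c1, c2, c3, c4, c5, c6⟩ := ihres
        refine ⟨c1, c2, c3, ?_, c5, c6⟩
        intro p hp
        apply c4
        simp only [List.mem_append, List.mem_cons, List.not_mem_nil] at hp ⊢
        tauto
      · -- five/reach/not-V0 for the new configuration
        intro p hp
        rcases List.mem_append.mp hp with h | h
        · rcases List.mem_append.mp h with h2 | h2
          · exact hfr p (List.mem_append.mpr (Or.inl h2))
          · exact hfr p (by simp [List.mem_singleton.mp h2])
        · rcases List.mem_append.mp h with h2 | h2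
          · exact hnewfacts p h2
          · exact hfr p (by simp [h2])
      · exact hnd'
      · intro p
        rw [hvisF p, hvis p]
        simp only [List.mem_append, List.mem_cons]
        tauto
      · -- closure for comp ++ [(x, y)]
        intro p hp q hadj
        rcases List.mem_append.mp hp with h | h
        · exact (hvisF q).mpr (Or.inl (hcl p h q hadj))
        · rw [List.mem_singleton.mp h] at hadj
          obtain ⟨d, hd, he⟩ := nbrs_to_dirs x y hadj.2.2
          have := hpostF d hd (by rw [← he]; exact hadj.2.1)
          rw [he]
          exact this
      · -- fuel bound
        rw [List.length_append]
        simp only [List.length_cons] at hfuel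
        omega

-- painting the component onto out
lemma paint_spec (g : List (List Int)) (colour : Int) :
    ∀ (comp : List (Int × Int)) (out : List (List Int)),
    OShape out g →
    (∀ p ∈ comp, 0 ≤ p.1 ∧ p.1.toNat < g.length ∧ 0 ≤ p.2 ∧ p.2.toNat < RLen g p.1.toNat) →
    OShape (comp.foldl (fun o p => set2 o p.1 p.2 colour) out) g ∧
    (∀ a b : Int,
      ((a, b) ∈ comp → get2 0 (comp.foldl (fun o p => set2 o p.1 p.2 colour) out) a b = colour) ∧
      ((a, b) ∉ comp → get2 0 (comp.foldl (fun o p => set2 o p.1 p.2 colour) out) a b =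
        get2 0 out a b)) := by
  intro comp
  induction comp with
  | nil =>
    intro out hsh _
    exact ⟨hsh, fun a b => ⟨fun h => absurd h (List.not_mem_nil), fun _ => rfl⟩⟩
  | cons p t ih =>
    intro out hsh hmem
    have hbp := hmem p List.mem_cons_self
    have hout1 : p.1.toNat < out.length := by rw [hsh.1]; exact hbp.2.1
    have hout2 : p.2.toNat < ((out[p.1.toNat]?).getD []).length := by
      rw [show ((out[p.1.toNat]?).getD []).length = RLen out p.1.toNat from rfl, hsh.2]
      exact hbp.2.2.2
    have hsh' : OShape (set2 out p.1 p.2 colour) g := by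
      obtain ⟨r1, r2⟩ := set2_rowlen out p.1 p.2 colour
      refine ⟨by rw [r1]; exact hsh.1, fun i => ?_⟩
      rw [show RLen (set2 out p.1 p.2 colour) i =
        (((set2 out p.1 p.2 colour)[i]?).getD []).length from rfl, r2 i]
      exact hsh.2 i
    obtain ⟨ihs, ihc⟩ := ih (set2 out p.1 p.2 colour) hsh'
      (fun q hq => hmem q (List.mem_cons_of_mem p hq))
    rw [List.foldl_cons]
    refine ⟨ihs, ?_⟩
    intro a b
    have hgs := get2_set2 0 colour hbp.1 hbp.2.2.1 hout1 hout2 a b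
    constructor
    · intro hab
      by_cases hat : (a, b) ∈ t
      · exact (ihc a b).1 hat
      · have hap : (a, b) = p := by
          rcases List.mem_cons.mp hab with h | h
          · exact h
          · exact absurd h hat
        rw [(ihc a b).2 hat, hgs, if_pos (by rw [← hap]; exact ⟨rfl, rfl⟩)]
    · intro hab
      have hat : (a, b) ∉ t := fun h => hab (List.mem_cons_of_mem p h)
      have hap : ¬ (a = p.1 ∧ b = p.2) := by
        rintro ⟨h1, h2⟩
        exact hab (by rw [List.mem_cons]; left; rw [h1, h2])
      rw [(ihc a b).2 hat, hgs, if_neg hap]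

-- one cell of the outer sweep
lemma cellA_spec (g : List (List Int)) (hPre : Pre_transform g) (r c : Int)
    (hr0 : 0 ≤ r) (hrH : r < hI g) (hc0 : 0 ≤ c) (hcW : c < wI g)
    (st : List (List Int) × List (List Bool)) (hinv : OInv g st) :
    OInv g (cellA g (hI g) (wI g) st r c) ∧
    (∀ p ∈ VisSet st.2, p ∈ VisSet (cellA g (hI g) (wI g) st r c).2) ∧
    (FiveP g (r, c) → (r, c) ∈ VisSet (cellA g (hI g) (wI g) st r c).2) := by
  obtain ⟨hout, hvsh, hfives, hclosed, hvals⟩ := hinv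
  by_cases hcond : get2 0 g r c = 5 ∧ get2 false st.2 r c = false
  · -- a fresh component is explored and painted
    have hfive : FiveP g (r, c) := (five_iff hr0 hrH hc0 hcW).mpr hcond.1
    have hseedNV : (r, c) ∉ VisSet st.2 := by
      intro hmem
      have hm2 : get2 false st.2 r c = true := hmem
      rw [hcond.2] at hm2
      cases hm2
    have hsh1 : GShape (set2 st.2 r c true) g.length (g.headD []).length :=
      gshape_set2 hvsh _ _ _
    have hrowb := gshape_rowlen hvsh (show r.toNat < g.length by
      have := hrH; unfold hI at this; omega)
    have hvs1 := visSet_set2 hr0 hc0 hrowb.1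
      (by rw [hrowb.2]; have := hcW; unfold wI at this; omega)
    have e1 : (hI g).toNat = g.length := by simp [hI]
    have e2 : (wI g).toNat = (g.headD []).length := by simp [wI]
    obtain ⟨rsh, rnd, rfacts, rmem, rvis, rcl⟩ :=
      dfsA_spec g (r, c) (· ∈ VisSet st.2) (2 * ((hI g).toNat * (wI g).toNat) + 1)
        [(r, c)] [] (set2 st.2 r c true) hsh1
        (by
          intro p hp
          rw [List.nil_append, List.mem_singleton] at hp
          subst hp
          exact ⟨hfive, Relation.ReflTransGen.refl, hseedNV⟩)
        (by simp)
        (by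
          intro p
          rw [hvs1 p]
          simp only [List.nil_append, List.mem_singleton])
        (by intro p hp; exact absurd hp (List.not_mem_nil))
        (by
          have hle := unvisCount_le g (set2 st.2 r c true)
          rw [List.length_singleton, e1, e2]
          omega)
    set res := dfsA g (hI g) (wI g) (2 * ((hI g).toNat * (wI g).toNat) + 1)
      [(r, c)] (set2 st.2 r c true) [] with hresdef
    have hseedmem : (r, c) ∈ res.2 := rmem (r, c) (by simp)
    -- the component list is exactly the reachable set
    have hcompmem : ∀ p, p ∈ res.2 ↔ ReachP g (r, c) p := by
      intro p
      constructor
      · exact fun hp => (rfacts p hp).2.1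
      · intro hq
        induction hq with
        | refl => exact hseedmem
        | @tail b q hb hadj ihb =>
          have hqv := rcl b ihb q hadj
          rcases (rvis q).mp hqv with hV0 | hgood
          · exfalso
            have hrc : ReachP g q (r, c) :=
              reachP_symm g (Relation.ReflTransGen.tail hb hadj)
            exact hseedNV (hclosed q hV0 (r, c) hrc)
          · exact hgood
    have hcard : res.2.length = CompCard g (r, c) :=
      card_eq_length g (r, c) res.2 rnd hcompmem
    -- the painted output
    have hbounds : ∀ p ∈ res.2,
        0 ≤ p.1 ∧ p.1.toNat < g.length ∧ 0 ≤ p.2 ∧ p.2.toNat < RLen g p.1.toNat := by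
      intro p hp
      have hb := five_bounds (rfacts p hp).1
      unfold hI wI at hb
      have h1 : p.1.toNat < g.length := by omega
      refine ⟨hb.1, h1, hb.2.2.1, ?_⟩
      have := pre_rowlen hPre h1
      omega
    obtain ⟨psh, pvals⟩ := paint_spec g (if res.2.length = 6 then 2 else 1) res.2 st.1 hout hbounds
    have hcolour : ∀ p ∈ res.2, (if res.2.length = 6 then (2 : Int) else 1) = colourOf g p := by
      intro p hp
      rw [colourOf_congr g ((hcompmem p).mp hp)]
      unfold colourOf
      rw [hcard]
    have hcell : cellA g (hI g) (wI g) st r c =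
        (res.2.foldl (fun o p => set2 o p.1 p.2 (if res.2.length = 6 then 2 else 1)) st.1,
          res.1) := by
      unfold cellA
      rw [if_pos hcond]
    rw [hcell]
    have hV0notcomp : ∀ p ∈ res.2, p ∉ VisSet st.2 := fun p hp => (rfacts p hp).2.2
    refine ⟨⟨psh, rsh, ?_, ?_, ?_⟩, ?_, ?_⟩
    · -- all visited cells are 5-cells
      intro p hp
      rcases (rvis p).mp hp with h | h
      · exact hfives p h
      · exact (rfacts p h).1
    · -- visited set is closed under reachability
      intro p hp q hpq
      rcases (rvis p).mp hp with h | h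
      · exact (rvis q).mpr (Or.inl (hclosed p h q hpq))
      · exact (rvis q).mpr (Or.inr ((hcompmem q).mpr (((hcompmem p).mp h).trans hpq)))
    · -- output values
      intro a b ha0 haH hb0 hbW
      constructor
      · intro hab
        rcases (rvis (a, b)).mp hab with h | h
        · rw [(pvals a b).2 (fun hm => hV0notcomp _ hm h)]
          exact (hvals a b ha0 haH hb0 hbW).1 h
        · rw [(pvals a b).1 h]
          exact hcolour _ h
      · intro hab
        have h1 : (a, b) ∉ VisSet st.2 := fun h => hab ((rvis _).mpr (Or.inl h))
        have h2 : (a, b) ∉ res.2 := fun h => hab ((rvis _).mpr (Or.inr h))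
        rw [(pvals a b).2 h2]
        exact (hvals a b ha0 haH hb0 hbW).2 h1
    · -- monotone
      intro p hp
      exact (rvis p).mpr (Or.inl hp)
    · -- the scanned cell is now visited
      intro _
      exact (rvis _).mpr (Or.inr hseedmem)
  · -- skip: either not a 5 or already visited
    have hcell : cellA g (hI g) (wI g) st r c = st := by
      unfold cellA
      rw [if_neg hcond]
    rw [hcell]
    refine ⟨⟨hout, hvsh, hfives, hclosed, hvals⟩, fun p hp => hp, ?_⟩
    intro hf
    have h5 := five_val hf
    rcases Bool.eq_false_or_eq_true (get2 false st.2 r c) with hb | hb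
    · exact hb
    · exact absurd ⟨h5, hb⟩ hcond

lemma colFold_spec (g : List (List Int)) (hPre : Pre_transform g) (r : Int)
    (hr0 : 0 ≤ r) (hrH : r < hI g) :
    ∀ (cs : List Int), (∀ c ∈ cs, 0 ≤ c ∧ c < wI g) →
    ∀ st, OInv g st →
    OInv g (cs.foldl (fun st c => cellA g (hI g) (wI g) st r c) st) ∧
    (∀ p ∈ VisSet st.2, p ∈ VisSet (cs.foldl (fun st c => cellA g (hI g) (wI g) st r c) st).2) ∧
    (∀ c ∈ cs, FiveP g (r, c) →
      (r, c) ∈ VisSet (cs.foldl (fun st c => cellA g (hI g) (wI g) st r c) st).2) := by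
  intro cs
  induction cs with
  | nil =>
    intro _ st hinv
    exact ⟨hinv, fun p hp => hp, fun c hc => absurd hc (List.not_mem_nil)⟩
  | cons c cs ihc =>
    intro hcs st hinv
    have hc := hcs c List.mem_cons_self
    obtain ⟨h1, h2, h3⟩ := cellA_spec g hPre r c hr0 hrH hc.1 hc.2 st hinv
    obtain ⟨g1, g2, g3⟩ := ihc (fun c' hc' => hcs c' (List.mem_cons_of_mem c hc'))
      (cellA g (hI g) (wI g) st r c) h1
    rw [List.foldl_cons]
    refine ⟨g1, fun p hp => g2 p (h2 p hp), ?_⟩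
    intro c' hc' hf
    rcases List.mem_cons.mp hc' with rfl | h
    · exact g2 _ (h3 hf)
    · exact g3 c' h hf

lemma rowFold_spec (g : List (List Int)) (hPre : Pre_transform g) :
    ∀ (rs : List Int), (∀ r ∈ rs, 0 ≤ r ∧ r < hI g) →
    ∀ st, OInv g st →
    OInv g (rs.foldl
      (fun st r => (PySem.List.pyRange 0 (wI g) 1).foldl
        (fun st c => cellA g (hI g) (wI g) st r c) st) st) ∧
    (∀ p ∈ VisSet st.2, p ∈ VisSet (rs.foldl
      (fun st r => (PySem.List.pyRange 0 (wI g) 1).foldl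
        (fun st c => cellA g (hI g) (wI g) st r c) st) st).2) ∧
    (∀ r ∈ rs, ∀ c : Int, 0 ≤ c → c < wI g → FiveP g (r, c) →
      (r, c) ∈ VisSet (rs.foldl
        (fun st r => (PySem.List.pyRange 0 (wI g) 1).foldl
          (fun st c => cellA g (hI g) (wI g) st r c) st) st).2) := by
  intro rs
  induction rs with
  | nil =>
    intro _ st hinv
    exact ⟨hinv, fun p hp => hp, fun r hr => absurd hr (List.not_mem_nil)⟩
  | cons r rs ihr =>
    intro hrs st hinv
    have hr := hrs r List.mem_cons_self
    obtain ⟨h1, h2, h3⟩ := colFold_spec g hPre r hr.1 hr.2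
      (PySem.List.pyRange 0 (wI g) 1)
      (fun c hc => (PySem.List.mem_pyRange_one.mp hc))
      st hinv
    obtain ⟨g1, g2, g3⟩ := ihr (fun r' hr' => hrs r' (List.mem_cons_of_mem r hr'))
      ((PySem.List.pyRange 0 (wI g) 1).foldl (fun st c => cellA g (hI g) (wI g) st r c) st) h1
    rw [List.foldl_cons]
    refine ⟨g1, fun p hp => g2 p (h2 p hp), ?_⟩
    intro r' hr' c hc0 hcW hf
    rcases List.mem_cons.mp hr' with rfl | h
    · exact g2 _ (h3 c (PySem.List.mem_pyRange_one.mpr ⟨hc0, hcW⟩) hf)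
    · exact g3 r' h c hc0 hcW hf

lemma OInv_init (g : List (List Int)) :
    OInv g (g, List.replicate g.length (List.replicate (wI g).toNat false)) := by
  have hget : ∀ a b : Int,
      get2 false (List.replicate g.length (List.replicate (wI g).toNat false)) a b = false := by
    intro a b
    unfold get2
    split
    · rw [List.getElem?_replicate]
      split
      · simp only [Option.getD_some, List.getElem?_replicate]
        split <;> simp
      · simp
    · rfl
  refine ⟨⟨rfl, fun _ => rfl⟩, ⟨List.length_replicate, ?_⟩, ?_, ?_, ?_⟩
  · intro i row h
    rw [List.getElem?_replicate] at h
    split at h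
    · cases h
      simp [wI]
    · cases h
  · intro p hp
    have : get2 false _ p.1 p.2 = true := hp
    rw [hget] at this
    cases this
  · intro p hp
    have : get2 false _ p.1 p.2 = true := hp
    rw [hget] at this
    cases this
  · intro a b _ _ _ _
    constructor
    · intro hp
      have : get2 false _ a b = true := hp
      rw [hget] at this
      cases this
    · intro _
      rfl

-- final characterization of port A
lemma transformA_char (g : List (List Int)) (hPre : Pre_transform g) :
    OShape (transform g) g ∧
    (∀ a b : Int, 0 ≤ a → a < hI g → 0 ≤ b → b.toNat < RLen g a.toNat →
      (FiveP g (a, b) → get2 0 (transform g) a b = colourOf g (a, b)) ∧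
      (¬ FiveP g (a, b) → get2 0 (transform g) a b = get2 0 g a b)) := by
  have htr : transform g = ((PySem.List.pyRange 0 (hI g) 1).foldl
      (fun st r => (PySem.List.pyRange 0 (wI g) 1).foldl
        (fun st c => cellA g (hI g) (wI g) st r c) st)
      (g, List.replicate g.length (List.replicate (wI g).toNat false))).1 := rfl
  obtain ⟨hinv, _, hall⟩ := rowFold_spec g hPre (PySem.List.pyRange 0 (hI g) 1)
    (fun r hr => (PySem.List.mem_pyRange_one.mp hr))
    (g, List.replicate g.length (List.replicate (wI g).toNat false))
    (OInv_init g)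
  obtain ⟨hout, hvsh, hfives, hclosed, hvals⟩ := hinv
  rw [htr]
  refine ⟨hout, ?_⟩
  intro a b ha0 haH hb0 hbW
  constructor
  · intro hf
    have hbWf : b < wI g := (five_bounds hf).2.2.2
    have hmem := hall a (PySem.List.mem_pyRange_one.mpr ⟨ha0, haH⟩) b hb0 hbWf hf
    exact (hvals a b ha0 haH hb0 hbW).1 hmem
  · intro hf
    exact (hvals a b ha0 haH hb0 hbW).2 (fun hm => hf (hfives _ hm))

-- ===== B side =====
lemma mem_growB (g : List (List Int)) (cells : PySem.Set (Int × Int)) (q : Int × Int) :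
    q ∈ growB g (hI g) (wI g) cells ↔ q ∈ cells ∨ (∃ p ∈ cells, q ∈ nbrsB p) ∧ FiveP g q := by
  unfold growB
  rw [PySem.Set.mem_union]
  simp only [List.mem_filter, List.mem_flatMap]
  unfold FiveP
  tauto

lemma satB_spec (g : List (List Int)) (seed : Int × Int) :
    ∀ (fuel : Nat) (cells : PySem.Set (Int × Int)), cells.Nodup → seed ∈ cells →
    (∀ q ∈ cells, FiveP g q ∧ ReachP g seed q) →
    g.length * (g.headD []).length + 1 ≤ cells.length + fuel →
    satB g (hI g) (wI g) fuel cells = (CompCard g seed : Int) := by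
  intro fuel
  induction fuel with
  | zero =>
    intro cells hnd hseed hinv hfuel
    exfalso
    have hb : cells.length ≤ g.length * (g.headD []).length := by
      apply nodup_bound cells hnd
      intro p hp
      simpa [hI, wI] using five_bounds (hinv p hp).1
    omega
  | succ f ih =>
    intro cells hnd hseed hinv hfuel
    have hsub : ∀ q ∈ cells, q ∈ growB g (hI g) (wI g) cells :=
      fun q hq => (mem_growB g cells q).mpr (Or.inl hq)
    have hsubperm : cells.Subperm (growB g (hI g) (wI g) cells) :=
      List.Nodup.subperm hnd (fun q hq => hsub q hq)
    show (if PySem.Set.len (growB g (hI g) (wI g) cells) = PySem.Set.len cells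
      then PySem.Set.len cells else satB g (hI g) (wI g) f (growB g (hI g) (wI g) cells)) = _
    by_cases heq : PySem.Set.len (growB g (hI g) (wI g) cells) = PySem.Set.len cells
    · rw [if_pos heq]
      have hlen : (growB g (hI g) (wI g) cells).length = cells.length := by
        have h2 := heq
        simp only [PySem.Set.len, Nat.cast_inj] at h2
        exact h2
      have hperm : cells.Perm (growB g (hI g) (wI g) cells) :=
        hsubperm.perm_of_length_le (by omega)
      have hmemeq : ∀ q, q ∈ cells ↔ ReachP g seed q := by
        intro q
        constructor
        · exact fun hq => (hinv q hq).2
        · refine reach_in_closed g cells seed hseed ?_ q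
          intro a ha b hadj
          have hbg : b ∈ growB g (hI g) (wI g) cells :=
            (mem_growB g cells b).mpr (Or.inr ⟨⟨a, ha, hadj.2.2⟩, hadj.2.1⟩)
          exact (hperm.mem_iff).mpr hbg
      have hcard := card_eq_length g seed cells hnd hmemeq
      show ((cells.length : Int)) = _
      rw [hcard]
    · rw [if_neg heq]
      have hndg : (growB g (hI g) (wI g) cells).Nodup := by
        unfold growB
        exact PySem.Set.nodup_union _ _ hnd
      have hlt : cells.length < (growB g (hI g) (wI g) cells).length := by
        refine lt_of_le_of_ne hsubperm.length_le ?_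
        intro h
        exact heq (by simp only [PySem.Set.len, h])
      refine ih (growB g (hI g) (wI g) cells) hndg (hsub seed hseed) ?_ (by omega)
      intro q hq
      rcases (mem_growB g cells q).mp hq with h | ⟨⟨p, hp, hqn⟩, hqf⟩
      · exact hinv q h
      · have hpq : AdjP g p q := ⟨(hinv p hp).1, hqf, hqn⟩
        exact ⟨hqf, (hinv p hp).2.trans (Relation.ReflTransGen.single hpq)⟩

lemma compSizeB_eq (g : List (List Int)) {r c : Int} (h : FiveP g (r, c)) :
    compSizeB g (hI g) (wI g) r c = (CompCard g (r, c) : Int) := by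
  unfold compSizeB
  have h0 : PySem.Set.ofList [(r, c)] = [(r, c)] := rfl
  rw [h0]
  apply satB_spec g (r, c) ((hI g).toNat * (wI g).toNat + 1) [(r, c)]
    (List.nodup_singleton _) (List.mem_singleton_self _)
  · intro q hq
    rw [List.mem_singleton] at hq
    subst hq
    exact ⟨h, Relation.ReflTransGen.refl⟩
  · have e1 : (hI g).toNat = g.length := by simp [hI]
    have e2 : (wI g).toNat = (g.headD []).length := by simp [wI]
    rw [List.length_singleton, e1, e2]
    omega

lemma transformAlt_char (g : List (List Int)) :
    OShape (transform_alt g) g ∧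
    (∀ a b : Int, 0 ≤ a → a < hI g → 0 ≤ b → b.toNat < RLen g a.toNat →
      (FiveP g (a, b) → get2 0 (transform_alt g) a b = colourOf g (a, b)) ∧
      (¬ FiveP g (a, b) → get2 0 (transform_alt g) a b = get2 0 g a b)) := by
  have halt : transform_alt g = (PySem.List.enumerate g 0).map
      (fun rrow => rowAlt g (hI g) (wI g) rrow.1 rrow.2) := rfl
  have hrow : ∀ (i : Nat),
      (transform_alt g)[i]? =
        (g[i]?).map (fun row => rowAlt g (hI g) (wI g) ((0 : Int) + (i : Int)) row) := by
    intro i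
    rw [halt, List.getElem?_map, PySem.List.getElem?_enumerate, Option.map_map]
    rfl
  have hlen : (transform_alt g).length = g.length := by
    rw [halt, List.length_map, PySem.List.length_enumerate]
  have hrlen : ∀ (r : Int) (row : List Int), (rowAlt g (hI g) (wI g) r row).length = row.length := by
    intro r row
    rw [rowAlt, List.length_map, PySem.List.length_enumerate]
  constructor
  · refine ⟨hlen, ?_⟩
    intro i
    unfold RLen
    rw [hrow i]
    by_cases hi : i < g.length
    · rw [List.getElem?_eq_getElem hi]
      simp only [Option.map_some, Option.getD_some]
      rw [hrlen]
    · rw [List.getElem?_eq_none (by omega)]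
      rfl
  · intro a b ha0 haH hb0 hbW
    have hiH : a.toNat < g.length := by simp [hI] at haH; omega
    have hjW : b.toNat < (g[a.toNat] : List Int).length := by
      have : RLen g a.toNat = (g[a.toNat] : List Int).length := by
        unfold RLen
        rw [List.getElem?_eq_getElem hiH]
        rfl
      omega
    have hval : get2 0 (transform_alt g) a b =
        (if fiveB g (hI g) (wI g) ((0 : Int) + (a.toNat : Int)) ((0 : Int) + (b.toNat : Int))
          then (if compSizeB g (hI g) (wI g) ((0 : Int) + (a.toNat : Int)) ((0 : Int) + (b.toNat : Int)) = 6 then 2 else 1)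
          else g[a.toNat][b.toNat]) := by
      unfold get2
      rw [if_pos ⟨ha0, hb0⟩, hrow a.toNat, List.getElem?_eq_getElem hiH]
      simp only [Option.map_some, Option.getD_some]
      rw [rowAlt, List.getElem?_map, PySem.List.getElem?_enumerate,
        List.getElem?_eq_getElem hjW]
      rfl
    have hgv : get2 0 g a b = g[a.toNat][b.toNat] := by
      unfold get2
      rw [if_pos ⟨ha0, hb0⟩, List.getElem?_eq_getElem hiH]
      simp only [Option.getD_some]
      rw [List.getElem?_eq_getElem hjW]
      rfl
    have hcast : ((0 : Int) + (a.toNat : Int)) = a := by omega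
    have hcast2 : ((0 : Int) + (b.toNat : Int)) = b := by omega
    rw [hcast, hcast2] at hval
    constructor
    · intro hf
      rw [hval, if_pos (show fiveB g (hI g) (wI g) a b = true from hf)]
      rw [compSizeB_eq g hf]
      unfold colourOf
      by_cases hc : CompCard g (a, b) = 6
      · rw [if_pos hc, if_pos (by rw [hc]; rfl)]
      · rw [if_neg hc, if_neg (by intro hcc; exact hc (by omega))]
    · intro hf
      rw [hval, if_neg (show ¬ fiveB g (hI g) (wI g) a b = true from hf), hgv]

-- ===== VERDICT (by name: the statement is the Claim_ definition above) =====
theorem transform_spec : Claim_equal_transform := by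
  intro g _ hPre
  show transform g = transform_alt g
  obtain ⟨hsA, hcA⟩ := transformA_char g hPre
  obtain ⟨hsB, hcB⟩ := transformAlt_char g
  refine ext2 _ _ g hsA hsB ?_
  intro a b ha0 haH hb0 hbW
  by_cases hf : FiveP g (a, b)
  · rw [(hcA a b ha0 haH hb0 hbW).1 hf, (hcB a b ha0 haH hb0 hbW).1 hf]
  · rw [(hcA a b ha0 haH hb0 hbW).2 hf, (hcB a b ha0 haH hb0 hbW).2 hf]
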